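-- pv_equiv track=rewrite | github.com/codefutureinvent/ConsoleSoftwares | Squarerator/main.py | squarerator
-- ===== SOURCE A (Python) =====
-- class Enum:
--     FIRST_LAST_ROW = 2
--
-- def squarerator(size: int, figure: str, separator: str) -> str:
--     size = abs(size)
--     figure = figure if figure else '*'
--     separator = separator if separator else ' '
--     first_last_row = figure + (separator + figure) * (size - 1)
--     rows = f'{figure + separator * (size + (size - 1) - 2)}{figure}\n'
--     square = f'{first_last_row}\n'
--     for i in range(size - Enum.FIRST_LAST_ROW):
--         square += rows
--     square += first_last_row
--     return square if size > 1 else figure if size != 0 else ''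
-- ===== SOURCE B (Python) =====
-- def squarerator(size: int, figure: str, separator: str) -> str:
--     size = abs(size)
--     figure = figure if figure else '*'
--     separator = separator if separator else ' '
--
--     def row(i):
--         return separator.join([figure if i == 0 or i == size - 1
--                                or j == 0 or j == size - 1 else separator
--                                for j in range(size)])
--
--     border = row(0)
--     middle = row(1) if size > 2 else ''
--     return '\n'.join([border if i == 0 or i == size - 1 else middle
--                       for i in range(size)])
-- ===== Notes on version B (the rewrite author's own statement) =====
-- stated objective: simpler
-- what changed: Replaces A's precomputed row strings, string-repetition arithmetic and triple special-case return with a uniform cell grid: a double loop choosing figure on the border and separator inside, rows joined by separator and lines by newline; size 0 and 1 fall out naturally.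
import Mathlib
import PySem

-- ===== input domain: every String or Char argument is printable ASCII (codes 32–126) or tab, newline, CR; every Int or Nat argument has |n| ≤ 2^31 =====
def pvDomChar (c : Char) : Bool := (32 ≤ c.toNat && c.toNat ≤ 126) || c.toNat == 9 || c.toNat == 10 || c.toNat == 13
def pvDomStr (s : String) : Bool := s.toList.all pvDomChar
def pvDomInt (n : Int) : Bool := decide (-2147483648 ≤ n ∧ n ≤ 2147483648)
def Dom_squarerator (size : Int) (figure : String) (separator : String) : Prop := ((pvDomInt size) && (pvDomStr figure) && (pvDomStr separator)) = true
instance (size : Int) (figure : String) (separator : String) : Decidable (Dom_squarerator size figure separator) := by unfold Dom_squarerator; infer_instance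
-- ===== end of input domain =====

-- B replaces A's precomputed row strings, repetition arithmetic and triple special-case
-- return by a uniform border/interior cell grid (double loop + joins); same return value.

-- ===== PORT A =====
-- Python string repetition 's * n' (n ≤ 0 gives ''), hand-ported (exact), structural on the count
def pvRepN (k : Nat) (cs : List Char) : List Char :=
  match k with
  | 0 => []
  | k + 1 => cs ++ pvRepN k cs

def pvRep (cs : List Char) (n : Int) : List Char := pvRepN n.toNat cs

-- A's body after 'size = abs(size)' and the figure/separator truthiness defaults
def pvSquareA (n : Int) (fig sep : List Char) : String :=
  let firstLastRow : List Char := fig ++ pvRep (sep ++ fig) (n - 1)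
  let rows : List Char := (fig ++ pvRep sep (n + (n - 1) - 2)) ++ fig ++ ['\n']
  let square : List Char := firstLastRow ++ ['\n']
  let square : List Char := (PySem.List.pyRange 0 (n - 2) 1).foldl (fun acc _ => acc ++ rows) square
  let square : List Char := square ++ firstLastRow
  if n > 1 then String.mk square else if n ≠ 0 then String.mk fig else String.mk []

def squarerator (size : Int) (figure : String) (separator : String) : String :=
  pvSquareA |size|
    (if figure.toList = [] then ['*'] else figure.toList)
    (if separator.toList = [] then [' '] else separator.toList)

-- ===== PORT B =====
-- B's row(i) helper: one row of the cell grid, cells joined by the separator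
def pvRowB (n : Int) (fig sep : List Char) (i : Int) : List Char :=
  PySem.Chars.join sep ((PySem.List.pyRange 0 n 1).map
    (fun j => if i = 0 ∨ i = n - 1 ∨ j = 0 ∨ j = n - 1 then fig else sep))

-- B's body after the same defaults: border row, (reused) middle row, rows joined by newline
def pvSquareB (n : Int) (fig sep : List Char) : String :=
  let border : List Char := pvRowB n fig sep 0
  let middle : List Char := if n > 2 then pvRowB n fig sep 1 else []
  String.mk (PySem.Chars.join ['\n']
    ((PySem.List.pyRange 0 n 1).map (fun i => if i = 0 ∨ i = n - 1 then border else middle)))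

def squarerator_alt (size : Int) (figure : String) (separator : String) : String :=
  pvSquareB |size|
    (if figure.toList = [] then ['*'] else figure.toList)
    (if separator.toList = [] then [' '] else separator.toList)

-- ===== PRECONDITION & SPEC =====
def Spec_squarerator (size : Int) (figure : String) (separator : String) (out : String) : Prop := out = squarerator_alt size figure separator
instance (size : Int) (figure : String) (separator : String) (out : String) : Decidable (Spec_squarerator size figure separator out) := by unfold Spec_squarerator; infer_instance

-- ===== CLAIM (what is proved, stated in full; the proofs are below) =====
def Claim_equal_squarerator : Prop := ∀ (size : Int) (figure : String) (separator : String), Dom_squarerator size figure separator → Spec_squarerator size figure separator (squarerator size figure separator)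

-- ===== LEMMAS AND PROOFS =====

theorem pvRepN_comm (k : Nat) (cs : List Char) :
    cs ++ pvRepN k cs = pvRepN k cs ++ cs := by
  induction k with
  | zero => simp [pvRepN]
  | succ k ih =>
    show cs ++ (cs ++ pvRepN k cs) = (cs ++ pvRepN k cs) ++ cs
    conv_lhs => rw [ih]
    rw [← List.append_assoc]

theorem pvRepN_succ_right (k : Nat) (cs : List Char) :
    pvRepN (k + 1) cs = pvRepN k cs ++ cs := by
  simp only [pvRepN]; exact pvRepN_comm k cs

theorem pvRepN_double (k : Nat) (c : List Char) :
    pvRepN k (c ++ c) = pvRepN (2 * k) c := by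
  induction k with
  | zero => rfl
  | succ k ih =>
    have h2 : 2 * (k + 1) = (2 * k) + 1 + 1 := by omega
    rw [h2]
    simp only [pvRepN, ih, List.append_assoc]

theorem pvRepN_shuffle (k : Nat) (a b : List Char) :
    pvRepN k (a ++ b) ++ a = a ++ pvRepN k (b ++ a) := by
  induction k with
  | zero => simp [pvRepN]
  | succ k ih => simp only [pvRepN, List.append_assoc, ih]

theorem join_rep (s x y c : List Char) (k : Nat) :
    PySem.Chars.join s (x :: (List.replicate k c ++ [y]))
      = x ++ pvRepN k (s ++ c) ++ s ++ y := by
  induction k generalizing x with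
  | zero => simp [PySem.Chars.join_cons_cons, PySem.Chars.join_singleton, pvRepN]
  | succ k ih =>
    rw [List.replicate_succ]
    have := ih c
    simp only [List.cons_append, PySem.Chars.join_cons_cons] at *
    rw [this]
    simp [pvRepN, List.append_assoc]

theorem foldl_append_const {α : Type} (l : List α) (r : List Char) (init : List Char) :
    l.foldl (fun acc _ => acc ++ r) init = init ++ pvRepN l.length r := by
  induction l generalizing init with
  | nil => simp [pvRepN]
  | cons a l ih =>
    simp only [List.foldl_cons, List.length_cons, ih, pvRepN_succ_right, List.append_assoc,
      ← pvRepN_comm]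

theorem replicate_split (k : Nat) (x : List Char) :
    List.replicate (k + 2) x = x :: (List.replicate k x ++ [x]) := by
  rw [List.replicate_succ]
  congr 1
  rw [List.replicate_succ']

theorem map_const_of_mem {α : Type} (l : List Nat) (g : Nat → α) (c : α)
    (h : ∀ j ∈ l, g j = c) : l.map g = List.replicate l.length c := by
  induction l with
  | nil => rfl
  | cons a l ih =>
    simp only [List.map_cons, List.length_cons, List.replicate_succ]
    exact congrArg₂ _ (h a (by simp)) (ih fun j hj => h j (by simp [hj]))

-- the list of B's rows: border, k middle lines, border
theorem map_border_mid (k : Nat) (b m : List Char) :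
    (List.range (k + 2)).map (fun i => if i = 0 ∨ i = k + 1 then b else m)
      = b :: (List.replicate k m ++ [b]) := by
  rw [List.range_succ_eq_map, List.range_succ]
  simp only [List.map_cons, List.map_append, List.map_map, Function.comp_def, List.map_nil,
    eq_self_iff_true, true_or, or_true, if_true, Nat.succ_eq_add_one]
  congr 1
  congr 1
  have := map_const_of_mem (List.range k)
    (fun j => if j + 1 = 0 ∨ j + 1 = k + 1 then b else m) m
    (fun j hj => by
      have hk := List.mem_range.mp hj
      show (if j + 1 = 0 ∨ j + 1 = k + 1 then b else m) = _
      rw [if_neg (by omega)])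
  simpa using this

-- the boundary row of B equals A's first_last_row
theorem row_boundary (k : Nat) (fig sep : List Char) (g : Nat → List Char)
    (hg : ∀ j, j < k + 2 → g j = fig) :
    PySem.Chars.join sep ((List.range (k + 2)).map g)
      = fig ++ pvRepN (k + 1) (sep ++ fig) := by
  have hmap : (List.range (k + 2)).map g = List.replicate (k + 2) fig := by
    have := map_const_of_mem (List.range (k + 2)) g fig
      (fun j hj => hg j (List.mem_range.mp hj))
    simpa using this
  rw [hmap, replicate_split, join_rep, pvRepN_succ_right]
  simp [List.append_assoc]

-- a middle row of B equals A's 'rows' line (without the trailing newline)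
theorem row_middle (k : Nat) (fig sep : List Char) (g : Nat → List Char)
    (hg0 : g 0 = fig) (hgl : g (k + 1) = fig)
    (hgm : ∀ j, j < k → g (j + 1) = sep) :
    PySem.Chars.join sep ((List.range (k + 2)).map g)
      = fig ++ pvRepN (2 * k + 1) sep ++ fig := by
  have hdec : (List.range (k + 2)).map g
      = g 0 :: ((List.range k).map (fun j => g (j + 1)) ++ [g (k + 1)]) := by
    rw [List.range_succ_eq_map, List.range_succ]
    simp [Function.comp_def]
  have hmid : (List.range k).map (fun j => g (j + 1)) = List.replicate k sep := by
    have := map_const_of_mem (List.range k) (fun j => g (j + 1)) sep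
      (fun j hj => hgm j (List.mem_range.mp hj))
    simpa using this
  rw [hdec, hg0, hgl, hmid, join_rep, pvRepN_double, pvRepN_succ_right]
  simp [List.append_assoc]

-- core equality, size already |·|-normalised to a natural number
theorem master (m : Nat) (fig sep : List Char) :
    pvSquareB (m : Int) fig sep = pvSquareA (m : Int) fig sep := by
  match m with
  | 0 =>
    have h0 : PySem.List.pyRange 0 (0 : Int) 1 = [] := rfl
    simp [pvSquareA, pvSquareB, pvRowB, h0, PySem.Chars.join_nil]
  | 1 =>
    have h1 : PySem.List.pyRange 0 (1 : Int) 1 = [0] := rfl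
    simp [pvSquareA, pvSquareB, pvRowB, h1, PySem.Chars.join_singleton]
  | (k + 2) =>
    have hn1 : (((k + 2 : Nat) : Int)) - 1 = ((k + 1 : Nat) : Int) := by push_cast; ring
    have hn2 : (((k + 2 : Nat) : Int)) + ((((k + 2 : Nat) : Int)) - 1) - 2
        = ((2 * k + 1 : Nat) : Int) := by push_cast; ring
    have hn3 : (((k + 2 : Nat) : Int)) - 2 = ((k : Nat) : Int) := by push_cast; ring
    have hgt : (1 : Int) < (((k + 2 : Nat) : Int)) := by push_cast; omega
    -- B side
    have hB : pvSquareB ((k + 2 : Nat) : Int) fig sep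
        = String.mk ((fig ++ pvRepN (k + 1) (sep ++ fig)) ++ ['\n']
            ++ pvRepN k ((fig ++ pvRepN (2 * k + 1) sep ++ fig) ++ ['\n'])
            ++ (fig ++ pvRepN (k + 1) (sep ++ fig))) := by
      have hb : pvRowB ((k + 2 : Nat) : Int) fig sep 0
          = fig ++ pvRepN (k + 1) (sep ++ fig) := by
        unfold pvRowB
        rw [PySem.List.pyRange_zero_nat, List.map_map]
        refine row_boundary k fig sep _ (fun j _ => ?_)
        show (if (0 : Int) = 0 ∨ (0 : Int) = (((k + 2 : Nat)) : Int) - 1 ∨ ((j : Nat) : Int) = 0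
            ∨ ((j : Nat) : Int) = (((k + 2 : Nat)) : Int) - 1 then fig else sep) = fig
        exact if_pos (Or.inl rfl)
      have hm : 1 ≤ k → pvRowB ((k + 2 : Nat) : Int) fig sep 1
          = fig ++ pvRepN (2 * k + 1) sep ++ fig := by
        intro hk
        unfold pvRowB
        rw [PySem.List.pyRange_zero_nat, List.map_map]
        apply row_middle
        · exact if_pos (Or.inr (Or.inr (Or.inl (by norm_num))))
        · exact if_pos (Or.inr (Or.inr (Or.inr (by push_cast; ring))))
        · intro j hj
          show (if (1 : Int) = 0 ∨ (1 : Int) = (((k + 2 : Nat)) : Int) - 1 ∨ ((j + 1 : Nat) : Int) = 0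
              ∨ ((j + 1 : Nat) : Int) = (((k + 2 : Nat)) : Int) - 1 then fig else sep) = sep
          exact if_neg (by push_cast; rintro (h | h | h | h) <;> omega)
      simp only [pvSquareB, PySem.List.pyRange_zero_nat, List.map_map, Function.comp_def]
      have hcong : ∀ i ∈ List.range (k + 2),
          (fun i : Nat => if ((i : Nat) : Int) = 0 ∨ ((i : Nat) : Int) = (((k + 2 : Nat)) : Int) - 1
            then pvRowB ((k + 2 : Nat) : Int) fig sep 0
            else (if (((k + 2 : Nat)) : Int) > 2 then pvRowB ((k + 2 : Nat) : Int) fig sep 1 else [])) i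
          = (fun i : Nat => if i = 0 ∨ i = k + 1
            then pvRowB ((k + 2 : Nat) : Int) fig sep 0
            else (if (((k + 2 : Nat)) : Int) > 2 then pvRowB ((k + 2 : Nat) : Int) fig sep 1 else [])) i :=
        fun i _ => if_congr (by push_cast; omega) rfl rfl
      rw [List.map_congr_left hcong, map_border_mid, join_rep, hb]
      have hmid : pvRepN k (['\n'] ++ (if (((k + 2 : Nat)) : Int) > 2
              then pvRowB ((k + 2 : Nat) : Int) fig sep 1 else []))
          = pvRepN k (['\n'] ++ (fig ++ pvRepN (2 * k + 1) sep ++ fig)) := by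
        rcases Nat.eq_zero_or_pos k with h | h
        · subst h; rfl
        · rw [if_pos (by push_cast; omega), hm h]
      rw [hmid]
      have hsh := pvRepN_shuffle k ['\n'] (fig ++ pvRepN (2 * k + 1) sep ++ fig)
      congr 1
      calc (fig ++ pvRepN (k + 1) (sep ++ fig))
            ++ pvRepN k (['\n'] ++ (fig ++ pvRepN (2 * k + 1) sep ++ fig)) ++ ['\n']
            ++ (fig ++ pvRepN (k + 1) (sep ++ fig))
          = (fig ++ pvRepN (k + 1) (sep ++ fig))
            ++ (pvRepN k (['\n'] ++ (fig ++ pvRepN (2 * k + 1) sep ++ fig)) ++ ['\n'])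
            ++ (fig ++ pvRepN (k + 1) (sep ++ fig)) := by simp [List.append_assoc]
        _ = (fig ++ pvRepN (k + 1) (sep ++ fig))
            ++ (['\n'] ++ pvRepN k ((fig ++ pvRepN (2 * k + 1) sep ++ fig) ++ ['\n']))
            ++ (fig ++ pvRepN (k + 1) (sep ++ fig)) := by rw [hsh]
        _ = _ := by simp [List.append_assoc]
    -- A side
    have hA : pvSquareA ((k + 2 : Nat) : Int) fig sep
        = String.mk ((fig ++ pvRepN (k + 1) (sep ++ fig)) ++ ['\n']
            ++ pvRepN k ((fig ++ pvRepN (2 * k + 1) sep ++ fig) ++ ['\n'])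
            ++ (fig ++ pvRepN (k + 1) (sep ++ fig))) := by
      simp only [pvSquareA, pvRep]
      rw [if_pos hgt, hn2, hn1, hn3, foldl_append_const]
      simp only [PySem.List.pyRange_zero_nat, List.length_map, List.length_range,
        Int.toNat_natCast]
    rw [hB, hA]

-- ===== VERDICT (by name: the statement is the Claim_ definition above) =====
theorem squarerator_spec : Claim_equal_squarerator := by
  intro size figure separator _
  unfold Spec_squarerator squarerator squarerator_alt
  have habs : |size| = ((size.natAbs : Nat) : Int) := by
    rw [Int.abs_eq_natAbs]
  rw [habs]
  exact (master size.natAbs _ _).symm
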